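-- pv_equiv track=rewrite | github.com/ralsina/rst2sile | sile/__init__.py | css_to_sile
-- ===== SOURCE A (Python) =====
-- def css_to_sile(style):
--     """Given a CSS-like style, create a SILE environment."""
--
--     font_keys = {'script', 'language', 'style', 'weight', 'family', 'size'}
--     margin_keys = {
--         'margin-left', 'margin-right', 'margin-top', 'margin-bottom'
--     }
--
--     keys = set(style.keys())
--     has_font = bool(keys.intersection(font_keys))
--     has_alignment = 'text-align' in keys
--     has_color = 'color' in keys
--     has_margin = bool(keys.intersection(margin_keys))
--     has_indent = 'text-indent' in keys
--
--     start = ''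
--     trailer = ''
--
--     if has_margin:
--         if 'margin-top' in keys:
--             start += '\\skip[height=%s]' % style['margin-top']
--         if 'margin-bottom' in keys:
--             trailer = '\\skip[height=%s]' % style['margin-bottom'] + trailer
--         if 'margin-right' in keys:
--             start += '\\relindent[right=%s]{' % style['margin-right']
--             trailer = '}' + trailer
--         if 'margin-left' in keys:
--             start += '\\relindent[left=%s]{' % style['margin-left']
--             trailer = '}' + trailer
--
--     if has_alignment:
--         value = style['text-align']
--         if value == 'right':
--             start += '\\begin{raggedleft}'
--             trailer = '\\end{raggedleft}' + trailer
--         elif value == 'center':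
--             start += '\\begin{center}'
--             trailer = '\\end{center}' + trailer
--         elif value in ['left']:
--             start += '\\begin{raggedright}'
--             trailer = '\\end{raggedright}' + trailer
--         # Fully justified is default
--
--     if has_font:
--         opts = ','.join('%s=%s' % (k, style[k]) for k in font_keys
--                         if k in style)
--         head = '\\font[%s]{' % opts
--         start += head
--         trailer = '}' + trailer
--
--     if has_indent:
--         start += '\\set[parameter=document.parindent,value=%s]' % style[
--             'text-indent']
--
--     if has_color:
--         start += '\\color[color=%s]{' % style['color']
--         trailer = '}' + trailer
--
--     return start, trailer
-- ===== SOURCE B (Python) =====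
-- def css_to_sile(style):
--     """Given a CSS-like style, create a SILE environment."""
--     # One dispatch pass over the style's own items, bucketing each recognized
--     # property into a fixed output slot; render the slots at the end.
--     FONT_KEYS = ('script', 'language', 'style', 'weight', 'family', 'size')
--
--     def classify(k, v):
--         if k == 'margin-top':
--             return 0, '\\skip[height=%s]' % v, ''
--         if k == 'margin-bottom':
--             return 1, '', '\\skip[height=%s]' % v
--         if k == 'margin-right':
--             return 2, '\\relindent[right=%s]{' % v, '}'
--         if k == 'margin-left':
--             return 3, '\\relindent[left=%s]{' % v, '}'
--         if k == 'text-align':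
--             env = {'right': 'raggedleft', 'center': 'center',
--                    'left': 'raggedright'}.get(v)
--             if env is None:
--                 return None
--             return 4, '\\begin{%s}' % env, '\\end{%s}' % env
--         if k == 'text-indent':
--             return 6, '\\set[parameter=document.parindent,value=%s]' % v, ''
--         if k == 'color':
--             return 7, '\\color[color=%s]{' % v, '}'
--         return None
--
--     slots = [('', '')] * 8
--     fonts = []
--     for k, v in style.items():
--         r = classify(k, v)
--         if r is not None:
--             p, s, c = r
--             slots[p] = (s, c)
--         elif k in FONT_KEYS:
--             fonts.append('%s=%s' % (k, v))
--     if fonts: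
--         slots[5] = ('\\font[%s]{' % ','.join(fonts), '}')
--     start = ''.join(s for s, _ in slots)
--     trailer = ''.join(c for _, c in reversed(slots))
--     return start, trailer
-- ===== Notes on version B (the rewrite author's own statement) =====
-- stated objective: alternative
-- what changed: Instead of A's checklist of membership tests per CSS property, B makes a single dispatch pass over the style's own items, classifying each item into a fixed output slot (plus a font-option accumulator) and rendering the slot array at the end.
import Mathlib
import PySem

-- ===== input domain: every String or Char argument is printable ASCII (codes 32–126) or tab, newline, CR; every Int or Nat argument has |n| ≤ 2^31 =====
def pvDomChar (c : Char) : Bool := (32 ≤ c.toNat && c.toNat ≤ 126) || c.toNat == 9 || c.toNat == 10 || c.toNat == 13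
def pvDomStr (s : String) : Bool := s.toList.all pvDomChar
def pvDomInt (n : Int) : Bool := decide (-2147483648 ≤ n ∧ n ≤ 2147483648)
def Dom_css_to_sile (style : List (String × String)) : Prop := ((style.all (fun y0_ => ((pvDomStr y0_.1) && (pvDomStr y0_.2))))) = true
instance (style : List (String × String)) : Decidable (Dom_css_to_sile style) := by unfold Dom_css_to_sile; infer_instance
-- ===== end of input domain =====

-- B replaces A's checklist of per-property membership tests by one dispatch pass over the
-- style's items into fixed output slots (alternative decomposition, not faster).


-- ===== PORT A =====
def css_to_sile (style : List (String × String)) : String × String :=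
  -- the dict argument, read off the association list
  let d := PySem.Dict.ofList style
  let fontKeys : List String := ["script", "language", "style", "weight", "family", "size"]
  -- bool(keys.intersection(font_keys)) etc.
  let hasFont := fontKeys.any (fun k => d.contains k)
  let hasAlignment := d.contains "text-align"
  let hasColor := d.contains "color"
  let hasMargin := d.contains "margin-left" || d.contains "margin-right" ||
                   d.contains "margin-top" || d.contains "margin-bottom"
  let hasIndent := d.contains "text-indent"
  let start := ""
  let trailer := ""
  let st :=
    if hasMargin then
      let start := if d.contains "margin-top" then start ++ "\\skip[height=" ++ d.getD "margin-top" "" ++ "]" else start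
      let trailer := if d.contains "margin-bottom" then "\\skip[height=" ++ d.getD "margin-bottom" "" ++ "]" ++ trailer else trailer
      let st := if d.contains "margin-right" then
          (start ++ "\\relindent[right=" ++ d.getD "margin-right" "" ++ "]{", "}" ++ trailer)
        else (start, trailer)
      if d.contains "margin-left" then
          (st.1 ++ "\\relindent[left=" ++ d.getD "margin-left" "" ++ "]{", "}" ++ st.2)
        else st
    else (start, trailer)
  let st :=
    if hasAlignment then
      let value := d.getD "text-align" ""
      if value = "right" then (st.1 ++ "\\begin{raggedleft}", "\\end{raggedleft}" ++ st.2)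
      else if value = "center" then (st.1 ++ "\\begin{center}", "\\end{center}" ++ st.2)
      else if ["left"].contains value then (st.1 ++ "\\begin{raggedright}", "\\end{raggedright}" ++ st.2)
      else st
    else st
  let st :=
    if hasFont then
      -- Python joins over a SET here (interpreter-dependent order); ported in the literal's
      -- written order — Pre_ admits at most one present font key, where every order coincides
      let opts := PySem.Str.join "," ((fontKeys.filter (fun k => d.contains k)).map (fun k => k ++ "=" ++ d.getD k ""))
      (st.1 ++ "\\font[" ++ opts ++ "]{", "}" ++ st.2)
    else st
  let st :=
    if hasIndent then (st.1 ++ "\\set[parameter=document.parindent,value=" ++ d.getD "text-indent" "" ++ "]", st.2)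
    else st
  let st :=
    if hasColor then (st.1 ++ "\\color[color=" ++ d.getD "color" "" ++ "]{", "}" ++ st.2)
    else st
  st

-- ===== PORT B =====
-- the three-entry text-align env table of Source B's classify
def pvEnvDict : PySem.Dict String String :=
  PySem.Dict.ofList [("right", "raggedleft"), ("center", "center"), ("left", "raggedright")]

-- Source B's classify(k, v): slot number, start piece, trailer closer
def pvClassify (k v : String) : Option (Nat × String × String) :=
  if k = "margin-top" then some (0, "\\skip[height=" ++ v ++ "]", "")
  else if k = "margin-bottom" then some (1, "", "\\skip[height=" ++ v ++ "]")
  else if k = "margin-right" then some (2, "\\relindent[right=" ++ v ++ "]{", "}")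
  else if k = "margin-left" then some (3, "\\relindent[left=" ++ v ++ "]{", "}")
  else if k = "text-align" then
    match pvEnvDict.get? v with
    | none => none
    | some e => some (4, "\\begin{" ++ e ++ "}", "\\end{" ++ e ++ "}")
  else if k = "text-indent" then some (6, "\\set[parameter=document.parindent,value=" ++ v ++ "]", "")
  else if k = "color" then some (7, "\\color[color=" ++ v ++ "]{", "}")
  else none

-- Source B's loop body: dispatch one item into the slot list / the font-option list
def pvStep (st : List (String × String) × List String) (kv : String × String) :
    List (String × String) × List String :=
  match pvClassify kv.1 kv.2 with
  | some (p, s, c) => (st.1.set p (s, c), st.2)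
  | none =>
      if ["script", "language", "style", "weight", "family", "size"].contains kv.1 then
        (st.1, st.2 ++ [kv.1 ++ "=" ++ kv.2])
      else st

def css_to_sile_alt (style : List (String × String)) : String × String :=
  let d := PySem.Dict.ofList style
  let st := d.items.foldl pvStep (List.replicate 8 (("" : String), ("" : String)), [])
  let slots := if st.2.isEmpty then st.1
    else st.1.set 5 ("\\font[" ++ PySem.Str.join "," st.2 ++ "]{", "}")
  (PySem.Str.join "" (slots.map Prod.fst),
   PySem.Str.join "" (slots.reverse.map Prod.snd))

-- ===== PRECONDITION & SPEC =====
-- Pre_ excludes styles containing two or more font keys, on which Python A's ','.join iterates a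
-- set and the option order depends on the interpreter's hash seed — not a function of the input.
def Pre_css_to_sile (style : List (String × String)) : Prop :=
  (["script", "language", "style", "weight", "family", "size"].countP
    (fun k => (PySem.Dict.ofList style).contains k)) ≤ 1

instance (style : List (String × String)) : Decidable (Pre_css_to_sile style) := by
  unfold Pre_css_to_sile; infer_instance

def pvWitness_css_to_sile : (List (String × String)) :=
  [("margin-top", "2em"), ("text-align", "center"), ("family", "Gentium"), ("color", "red")]

def Spec_css_to_sile (style : List (String × String)) (out : String × String) : Prop := out = css_to_sile_alt style
instance (style : List (String × String)) (out : String × String) : Decidable (Spec_css_to_sile style out) := by unfold Spec_css_to_sile; infer_instance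

-- ===== CLAIM (what is proved, stated in full; the proofs are below) =====
def Claim_equal_css_to_sile : Prop := ∀ (style : List (String × String)), Dom_css_to_sile style → Pre_css_to_sile style → Spec_css_to_sile style (css_to_sile style)

-- ===== LEMMAS AND PROOFS =====
set_option maxHeartbeats 1000000

lemma pv_icn (xss : List (List Char)) : List.intercalate [] xss = xss.flatten := by
  induction xss with
  | nil => rfl
  | cons x xs ih => cases xs <;> simp_all [List.intercalate, List.intersperse]

lemma pv_join0_nil : PySem.Str.join "" [] = "" := rfl

lemma pv_join0_cons (a : String) (l : List String) :
    PySem.Str.join "" (a :: l) = a ++ PySem.Str.join "" l := by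
  simp [PySem.Str.join, PySem.Chars.join, pv_icn, String.ofList_append]

lemma pv_join0_append (l1 l2 : List String) :
    PySem.Str.join "" (l1 ++ l2) = PySem.Str.join "" l1 ++ PySem.Str.join "" l2 := by
  induction l1 with
  | nil => simp [pv_join0_nil]
  | cons a t ih => simp [pv_join0_cons, ih, String.append_assoc]

-- one rule applied to a (start, trailer) state
def pvUpd (st : String × String) (r : Bool × String × String) : String × String :=
  if r.1 then (st.1 ++ r.2.1, r.2.2 ++ st.2) else st

lemma pv_foldA (rules : List (Bool × String × String)) (s t : String) :
    rules.foldl pvUpd (s, t) =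
      (s ++ PySem.Str.join "" ((rules.filter (fun r => r.1)).map (fun r => r.2.1)),
       PySem.Str.join "" ((rules.reverse.filter (fun r => r.1)).map (fun r => r.2.2)) ++ t) := by
  induction rules generalizing s t with
  | nil => simp [pv_join0_nil]
  | cons r rs ih =>
      by_cases hr : r.1 = true <;>
        simp [pvUpd, hr, ih, List.filter_append, List.map_append,
              pv_join0_cons, pv_join0_nil, pv_join0_append, String.append_assoc]

lemma pv_any_filter {α : Type} (l : List α) (p : α → Bool) :
    l.any p = !(l.filter p).isEmpty := by
  induction l with
  | nil => rfl
  | cons a t ih => by_cases h : p a = true <;> simp [h, ih]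

-- the alignment-env lookup, written as the if-chain A's comparisons produce
lemma pv_env_eq (v : String) :
    pvEnvDict.get? v
    = if "right" = v then some "raggedleft" else if "center" = v then some "center"
      else if "left" = v then some "raggedright" else none := by
  have hlit : pvEnvDict
      = PySem.Dict.mk [("right", "raggedleft"), ("center", "center"), ("left", "raggedright")] := by decide
  rw [hlit]
  simp only [PySem.Dict.get?_mk_cons, beq_iff_eq]
  have hnil : (PySem.Dict.mk ([] : List (String × String))).get? v = none := rfl
  rw [hnil]

lemma pv_contains_ta (d : PySem.Dict String String) :
    d.contains "text-align" = (d.get? "text-align").isSome := by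
  rw [PySem.Dict.contains_eq_isSome_get?]

lemma pv_getD_ta (d : PySem.Dict String String) :
    d.getD "text-align" "" = (d.get? "text-align").getD "" := by
  rw [PySem.Dict.getD_eq_get?_getD]

-- the option "the text-align value names an environment", shared by the rule table below
def pvEnvOpt (d : PySem.Dict String String) : Option String :=
  match d.get? "text-align" with
  | some v => pvEnvDict.get? v
  | none => none

-- A's eight (condition, start piece, trailer closer) rules, read off d
def pvRules (d : PySem.Dict String String) : List (Bool × String × String) := [
  (d.contains "margin-top", "\\skip[height=" ++ d.getD "margin-top" "" ++ "]", ""),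
  (d.contains "margin-bottom", "", "\\skip[height=" ++ d.getD "margin-bottom" "" ++ "]"),
  (d.contains "margin-right", "\\relindent[right=" ++ d.getD "margin-right" "" ++ "]{", "}"),
  (d.contains "margin-left", "\\relindent[left=" ++ d.getD "margin-left" "" ++ "]{", "}"),
  ((pvEnvOpt d).isSome, "\\begin{" ++ (pvEnvOpt d).getD "" ++ "}", "\\end{" ++ (pvEnvOpt d).getD "" ++ "}"),
  (!(["script", "language", "style", "weight", "family", "size"].filter (fun k => d.contains k)).isEmpty,
   "\\font[" ++ PySem.Str.join "," ((["script", "language", "style", "weight", "family", "size"].filter (fun k => d.contains k)).map (fun k => k ++ "=" ++ d.getD k "")) ++ "]{", "}"),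
  (d.contains "text-indent", "\\set[parameter=document.parindent,value=" ++ d.getD "text-indent" "" ++ "]", ""),
  (d.contains "color", "\\color[color=" ++ d.getD "color" "" ++ "]{", "}")]

-- stage lemmas: each block of A over the running (start, trailer) is one pvUpd of a rule
lemma pv_margin (d : PySem.Dict String String) :
    (if d.contains "margin-left" || d.contains "margin-right" ||
        d.contains "margin-top" || d.contains "margin-bottom" then
      let start := if d.contains "margin-top" then "" ++ "\\skip[height=" ++ d.getD "margin-top" "" ++ "]" else ""
      let trailer := if d.contains "margin-bottom" then "\\skip[height=" ++ d.getD "margin-bottom" "" ++ "]" ++ "" else ""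
      let st := if d.contains "margin-right" then
          (start ++ "\\relindent[right=" ++ d.getD "margin-right" "" ++ "]{", "}" ++ trailer)
        else (start, trailer)
      if d.contains "margin-left" then
          (st.1 ++ "\\relindent[left=" ++ d.getD "margin-left" "" ++ "]{", "}" ++ st.2)
        else st
    else ("", ""))
    = pvUpd (pvUpd (pvUpd (pvUpd ("", "")
        (d.contains "margin-top", "\\skip[height=" ++ d.getD "margin-top" "" ++ "]", ""))
        (d.contains "margin-bottom", "", "\\skip[height=" ++ d.getD "margin-bottom" "" ++ "]"))
        (d.contains "margin-right", "\\relindent[right=" ++ d.getD "margin-right" "" ++ "]{", "}"))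
        (d.contains "margin-left", "\\relindent[left=" ++ d.getD "margin-left" "" ++ "]{", "}") := by
  by_cases h1 : d.contains "margin-top" = true <;>
  by_cases h2 : d.contains "margin-bottom" = true <;>
  by_cases h3 : d.contains "margin-right" = true <;>
  by_cases h4 : d.contains "margin-left" = true <;>
  simp [pvUpd, h1, h2, h3, h4, String.append_assoc] <;>
  (apply String.toList_injective; simp [String.toList_append])

lemma pv_align (d : PySem.Dict String String) (stA stB : String × String) (h : stA = stB) :
    (if d.contains "text-align" then
      let value := d.getD "text-align" ""
      if value = "right" then (stA.1 ++ "\\begin{raggedleft}", "\\end{raggedleft}" ++ stA.2)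
      else if value = "center" then (stA.1 ++ "\\begin{center}", "\\end{center}" ++ stA.2)
      else if ["left"].contains value then (stA.1 ++ "\\begin{raggedright}", "\\end{raggedright}" ++ stA.2)
      else stA
    else stA)
    = pvUpd stB ((pvEnvOpt d).isSome,
        "\\begin{" ++ (pvEnvOpt d).getD "" ++ "}", "\\end{" ++ (pvEnvOpt d).getD "" ++ "}") := by
  subst h
  rw [pv_contains_ta, pv_getD_ta]
  unfold pvEnvOpt
  cases hta : d.get? "text-align" with
  | none => simp [pvUpd]
  | some v =>
      simp only [Option.isSome_some, Option.getD_some, if_true]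
      by_cases hv1 : v = "right"
      · subst hv1; simp [pvUpd, pv_env_eq]
      · by_cases hv2 : v = "center"
        · subst hv2; simp [pvUpd, pv_env_eq]
        · by_cases hv3 : v = "left"
          · subst hv3; simp [pvUpd, pv_env_eq]
          · simp [pvUpd, pv_env_eq, hv1, hv2, hv3, Ne.symm hv1, Ne.symm hv2, Ne.symm hv3]

lemma pv_font (d : PySem.Dict String String) (stA stB : String × String) (h : stA = stB) :
    (if (["script", "language", "style", "weight", "family", "size"].any fun k => d.contains k) then
      (stA.1 ++ "\\font[" ++ PySem.Str.join ","
          (((["script", "language", "style", "weight", "family", "size"].filter (fun k => d.contains k)).map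
            (fun k => k ++ "=" ++ d.getD k ""))) ++ "]{", "}" ++ stA.2)
    else stA)
    = pvUpd stB (!(["script", "language", "style", "weight", "family", "size"].filter (fun k => d.contains k)).isEmpty,
        "\\font[" ++ PySem.Str.join ","
          (((["script", "language", "style", "weight", "family", "size"].filter (fun k => d.contains k)).map
            (fun k => k ++ "=" ++ d.getD k ""))) ++ "]{", "}") := by
  subst h
  rw [pv_any_filter]
  by_cases hf : (["script", "language", "style", "weight", "family", "size"].filter (fun k => d.contains k)).isEmpty = true <;>
    simp [pvUpd, hf, String.append_assoc]

lemma pv_indent (d : PySem.Dict String String) (stA stB : String × String) (h : stA = stB) :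
    (if d.contains "text-indent" then
      (stA.1 ++ "\\set[parameter=document.parindent,value=" ++ d.getD "text-indent" "" ++ "]", stA.2)
    else stA)
    = pvUpd stB (d.contains "text-indent",
        "\\set[parameter=document.parindent,value=" ++ d.getD "text-indent" "" ++ "]", "") := by
  subst h
  by_cases hti : d.contains "text-indent" = true <;> simp [pvUpd, hti, String.append_assoc]

lemma pv_color (d : PySem.Dict String String) (stA stB : String × String) (h : stA = stB) :
    (if d.contains "color" then
      (stA.1 ++ "\\color[color=" ++ d.getD "color" "" ++ "]{", "}" ++ stA.2)
    else stA)
    = pvUpd stB (d.contains "color", "\\color[color=" ++ d.getD "color" "" ++ "]{", "}") := by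
  subst h
  by_cases hc : d.contains "color" = true <;> simp [pvUpd, hc, String.append_assoc]

-- ===== B-side characterisation =====

-- first-match value lookup in an association list (= Dict.get? on d.items, definitionally)
def pvLook (L : List (String × String)) (k : String) : Option String :=
  (L.find? (fun p => p.1 == k)).map Prod.snd

def pvO (ov : Option String) (f : String → String × String) (a : String × String) : String × String :=
  match ov with
  | some v => f v
  | none => a

lemma pvLook_cons (k v k' : String) (L : List (String × String)) :
    pvLook ((k, v) :: L) k' = if k = k' then some v else pvLook L k' := by
  by_cases h : k = k' <;> simp [pvLook, h]

lemma pvLook_eq_none (L : List (String × String)) (k : String)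
    (h : k ∉ L.map Prod.fst) : pvLook L k = none := by
  simp only [pvLook, Option.map_eq_none_iff]
  rw [List.find?_eq_none]
  intro p hp hpk
  exact h (List.mem_map.2 ⟨p, hp, by simpa using hpk⟩)

lemma pv_fold_char (L : List (String × String)) :
    ∀ (a0 a1 a2 a3 a4 a5 a6 a7 : String × String) (fs : List String),
    (L.map Prod.fst).Nodup →
    L.foldl pvStep ([a0, a1, a2, a3, a4, a5, a6, a7], fs) =
    ([pvO (pvLook L "margin-top") (fun v => ("\\skip[height=" ++ v ++ "]", "")) a0,
      pvO (pvLook L "margin-bottom") (fun v => ("", "\\skip[height=" ++ v ++ "]")) a1,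
      pvO (pvLook L "margin-right") (fun v => ("\\relindent[right=" ++ v ++ "]{", "}")) a2,
      pvO (pvLook L "margin-left") (fun v => ("\\relindent[left=" ++ v ++ "]{", "}")) a3,
      pvO ((pvLook L "text-align").bind pvEnvDict.get?)
        (fun e => ("\\begin{" ++ e ++ "}", "\\end{" ++ e ++ "}")) a4,
      a5,
      pvO (pvLook L "text-indent") (fun v => ("\\set[parameter=document.parindent,value=" ++ v ++ "]", "")) a6,
      pvO (pvLook L "color") (fun v => ("\\color[color=" ++ v ++ "]{", "}")) a7],
     fs ++ (L.filter (fun p => ["script", "language", "style", "weight", "family", "size"].contains p.1)).map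
       (fun p => p.1 ++ "=" ++ p.2)) := by
  induction L with
  | nil => intro a0 a1 a2 a3 a4 a5 a6 a7 fs _; simp [pvLook, pvO]
  | cons kv L ih =>
    intro a0 a1 a2 a3 a4 a5 a6 a7 fs hn
    obtain ⟨k, v⟩ := kv
    simp only [List.map_cons, List.nodup_cons] at hn
    obtain ⟨hk, hn'⟩ := hn
    by_cases h0 : k = "margin-top"
    · subst h0
      simp [pvStep, pvClassify, ih _ _ _ _ _ _ _ _ _ hn', pvLook_cons,
            pvLook_eq_none _ _ hk, pvO]
    · by_cases h1 : k = "margin-bottom"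
      · subst h1
        simp [pvStep, pvClassify, ih _ _ _ _ _ _ _ _ _ hn', pvLook_cons,
              pvLook_eq_none _ _ hk, pvO]
      · by_cases h2 : k = "margin-right"
        · subst h2
          simp [pvStep, pvClassify, ih _ _ _ _ _ _ _ _ _ hn', pvLook_cons,
                pvLook_eq_none _ _ hk, pvO]
        · by_cases h3 : k = "margin-left"
          · subst h3
            simp [pvStep, pvClassify, ih _ _ _ _ _ _ _ _ _ hn', pvLook_cons,
                  pvLook_eq_none _ _ hk, pvO]
          · by_cases h4 : k = "text-align"
            · subst h4
              cases henv : pvEnvDict.get? v with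
              | none =>
                simp [pvStep, pvClassify, henv, ih _ _ _ _ _ _ _ _ _ hn', pvLook_cons,
                      pvLook_eq_none _ _ hk, pvO]
              | some e =>
                simp [pvStep, pvClassify, henv, ih _ _ _ _ _ _ _ _ _ hn', pvLook_cons,
                      pvLook_eq_none _ _ hk, pvO]
            · by_cases h5 : k = "text-indent"
              · subst h5
                simp [pvStep, pvClassify, ih _ _ _ _ _ _ _ _ _ hn', pvLook_cons,
                      pvLook_eq_none _ _ hk, pvO]
              · by_cases h6 : k = "color"
                · subst h6
                  simp [pvStep, pvClassify, ih _ _ _ _ _ _ _ _ _ hn', pvLook_cons,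
                        pvLook_eq_none _ _ hk, pvO]
                · by_cases h7 : k = "script" ∨ k = "language" ∨ k = "style" ∨ k = "weight" ∨ k = "family" ∨ k = "size"
                  · simp [pvStep, pvClassify, h0, h1, h2, h3, h4, h5, h6, h7,
                          ih _ _ _ _ _ _ _ _ _ hn', pvLook_cons]
                  · simp [pvStep, pvClassify, h0, h1, h2, h3, h4, h5, h6, h7,
                          ih _ _ _ _ _ _ _ _ _ hn', pvLook_cons]

-- with unique keys, filtering an association list by one key yields its (single) binding
lemma pv_filter_key (L : List (String × String)) (k : String)
    (hn : (L.map Prod.fst).Nodup) :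
    L.filter (fun p => p.1 == k)
      = (match pvLook L k with | some v => [(k, v)] | none => []) := by
  induction L with
  | nil => rfl
  | cons kv L ih =>
    obtain ⟨a, b⟩ := kv
    simp only [List.map_cons, List.nodup_cons] at hn
    obtain ⟨ha, hn'⟩ := hn
    by_cases hak : a = k
    · subst hak
      have hfil : L.filter (fun p => p.1 == a) = [] := by
        rw [List.filter_eq_nil_iff]
        intro p hp hpa
        exact ha (List.mem_map.2 ⟨p, hp, by simpa using hpa⟩)
      simp [pvLook_cons, hfil]
    · simp [pvLook_cons, hak, ih hn']

lemma pv_fonts_eq (d : PySem.Dict String String)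
    (hn : (d.items.map Prod.fst).Nodup)
    (hpre : (["script", "language", "style", "weight", "family", "size"].countP
      (fun k => d.contains k)) ≤ 1) :
    (d.items.filter (fun p => ["script", "language", "style", "weight", "family", "size"].contains p.1)).map
        (fun p => p.1 ++ "=" ++ p.2)
    = (["script", "language", "style", "weight", "family", "size"].filter (fun k => d.contains k)).map
        (fun k => k ++ "=" ++ d.getD k "") := by
  have hcont : ∀ p ∈ d.items, d.contains p.1 = true := by
    intro p hp
    rw [PySem.Dict.contains_iff_mem_keys]
    exact List.mem_map.2 ⟨p, hp, rfl⟩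
  cases hF : ["script", "language", "style", "weight", "family", "size"].filter (fun k => d.contains k) with
  | nil =>
    have hfil : d.items.filter (fun p => ["script", "language", "style", "weight", "family", "size"].contains p.1) = [] := by
      rw [List.filter_eq_nil_iff]
      intro p hp hmem
      have : p.1 ∈ (["script", "language", "style", "weight", "family", "size"].filter (fun k => d.contains k)) :=
        List.mem_filter.2 ⟨by simpa using hmem, hcont p hp⟩
      rw [hF] at this
      simp at this
    rw [hfil]
    rfl
  | cons k t =>
    have hlen : (["script", "language", "style", "weight", "family", "size"].filter (fun k => d.contains k)).length ≤ 1 := by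
      simpa [List.countP_eq_length_filter] using hpre
    have ht : t = [] := by
      rw [hF] at hlen
      cases t with
      | nil => rfl
      | cons x xs => simp at hlen
    subst ht
    have hkmem : k ∈ ["script", "language", "style", "weight", "family", "size"] ∧ d.contains k = true := by
      have : k ∈ (["script", "language", "style", "weight", "family", "size"].filter (fun kk => d.contains kk)) := by
        rw [hF]; exact List.mem_cons_self
      exact ⟨(List.mem_filter.1 this).1, (List.mem_filter.1 this).2⟩
    have hcongr : ∀ p ∈ d.items,
        (["script", "language", "style", "weight", "family", "size"].contains p.1) = (p.1 == k) := by
      intro p hp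
      by_cases hm : p.1 ∈ ["script", "language", "style", "weight", "family", "size"]
      · have h1 : p.1 ∈ (["script", "language", "style", "weight", "family", "size"].filter (fun kk => d.contains kk)) :=
          List.mem_filter.2 ⟨hm, hcont p hp⟩
        rw [hF] at h1
        simp only [List.mem_singleton] at h1
        have hck : (["script", "language", "style", "weight", "family", "size"].contains k) = true := by
          simpa using hkmem.1
        rw [h1]
        exact hck.trans (by simp)
      · have hne : p.1 ≠ k := fun he => hm (he ▸ hkmem.1)
        simp only [List.mem_cons, List.not_mem_nil, or_false, not_or] at hm
        obtain ⟨m1, m2, m3, m4, m5, m6⟩ := hm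
        simp [hne, m1, m2, m3, m4, m5, m6]
    rw [List.filter_congr hcongr, pv_filter_key _ _ hn]
    obtain ⟨w, hw⟩ : ∃ w, d.get? k = some w := by
      have := PySem.Dict.contains_eq_isSome_get? (d := d) (k := k)
      rw [hkmem.2] at this
      exact Option.isSome_iff_exists.1 this.symm
    have hl : pvLook d.items k = some w := hw
    have hg : d.getD k "" = w := by simp [PySem.Dict.getD_eq_get?_getD, hw]
    rw [hl]
    simp [hg]

-- one characterised slot, as A's rule entry
lemma pv_slot_iff (d : PySem.Dict String String) (k : String) (f : String → String × String) :
    pvO (pvLook d.items k) f ("", "") = if d.contains k then f (d.getD k "") else ("", "") := by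
  have h : pvLook d.items k = d.get? k := rfl
  rw [h, PySem.Dict.contains_eq_isSome_get?, PySem.Dict.getD_eq_get?_getD]
  cases d.get? k <;> simp [pvO]

lemma pv_slot4 (d : PySem.Dict String String) :
    pvO ((pvLook d.items "text-align").bind pvEnvDict.get?)
      (fun e => ("\\begin{" ++ e ++ "}", "\\end{" ++ e ++ "}")) ("", "")
    = if (pvEnvOpt d).isSome then
        ("\\begin{" ++ (pvEnvOpt d).getD "" ++ "}", "\\end{" ++ (pvEnvOpt d).getD "" ++ "}")
      else ("", "") := by
  have h : pvLook d.items "text-align" = d.get? "text-align" := rfl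
  rw [h]
  unfold pvEnvOpt
  cases d.get? "text-align" with
  | none => rfl
  | some v => cases hv : pvEnvDict.get? v <;> simp [pvO, hv]

-- joins over the slot list are joins over the filtered rules
lemma pv_mapfst_if (rs : List (Bool × String × String)) :
    PySem.Str.join "" ((rs.map (fun r => if r.1 = true then r.2 else (("" : String), ("" : String)))).map Prod.fst)
    = PySem.Str.join "" ((rs.filter (fun r => r.1)).map (fun r => r.2.1)) := by
  induction rs with
  | nil => rfl
  | cons r rs ih =>
      by_cases h : r.1 = true <;>
        simp [h, pv_join0_cons, ih, -List.map_map]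

lemma pv_mapsnd_if (rs : List (Bool × String × String)) :
    PySem.Str.join "" ((rs.map (fun r => if r.1 = true then r.2 else (("" : String), ("" : String)))).map Prod.snd)
    = PySem.Str.join "" ((rs.filter (fun r => r.1)).map (fun r => r.2.2)) := by
  induction rs with
  | nil => rfl
  | cons r rs ih =>
      by_cases h : r.1 = true <;>
        simp [h, pv_join0_cons, ih, -List.map_map]

lemma pv_set5 (b0 b1 b2 b3 b4 b5 b6 b7 x : String × String) :
    [b0, b1, b2, b3, b4, b5, b6, b7].set 5 x = [b0, b1, b2, b3, b4, x, b6, b7] := rfl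

-- B computes the fold of A's rule table
lemma pv_alt_eq (style : List (String × String)) (hpre : Pre_css_to_sile style) :
    css_to_sile_alt style = (pvRules (PySem.Dict.ofList style)).foldl pvUpd ("", "") := by
  unfold css_to_sile_alt
  dsimp only
  have hn : ((PySem.Dict.ofList style).items.map Prod.fst).Nodup :=
    PySem.Dict.nodup_keys_ofList style
  have hrep : (List.replicate 8 (("" : String), ("" : String)))
      = [("", ""), ("", ""), ("", ""), ("", ""), ("", ""), ("", ""), ("", ""), ("", "")] := rfl
  rw [hrep, pv_fold_char _ _ _ _ _ _ _ _ _ _ hn]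
  dsimp only
  have hfonts := pv_fonts_eq (PySem.Dict.ofList style) hn hpre
  rw [List.nil_append, hfonts]
  set d := PySem.Dict.ofList style with hd
  set FA := (["script", "language", "style", "weight", "family", "size"].filter (fun k => d.contains k)).map
      (fun k => k ++ "=" ++ d.getD k "") with hFA
  have hslots : (if FA.isEmpty = true then
        [pvO (pvLook d.items "margin-top") (fun v => ("\\skip[height=" ++ v ++ "]", "")) ("", ""),
         pvO (pvLook d.items "margin-bottom") (fun v => ("", "\\skip[height=" ++ v ++ "]")) ("", ""),
         pvO (pvLook d.items "margin-right") (fun v => ("\\relindent[right=" ++ v ++ "]{", "}")) ("", ""),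
         pvO (pvLook d.items "margin-left") (fun v => ("\\relindent[left=" ++ v ++ "]{", "}")) ("", ""),
         pvO ((pvLook d.items "text-align").bind pvEnvDict.get?)
           (fun e => ("\\begin{" ++ e ++ "}", "\\end{" ++ e ++ "}")) ("", ""),
         ("", ""),
         pvO (pvLook d.items "text-indent") (fun v => ("\\set[parameter=document.parindent,value=" ++ v ++ "]", "")) ("", ""),
         pvO (pvLook d.items "color") (fun v => ("\\color[color=" ++ v ++ "]{", "}")) ("", "")]
      else
        [pvO (pvLook d.items "margin-top") (fun v => ("\\skip[height=" ++ v ++ "]", "")) ("", ""),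
         pvO (pvLook d.items "margin-bottom") (fun v => ("", "\\skip[height=" ++ v ++ "]")) ("", ""),
         pvO (pvLook d.items "margin-right") (fun v => ("\\relindent[right=" ++ v ++ "]{", "}")) ("", ""),
         pvO (pvLook d.items "margin-left") (fun v => ("\\relindent[left=" ++ v ++ "]{", "}")) ("", ""),
         pvO ((pvLook d.items "text-align").bind pvEnvDict.get?)
           (fun e => ("\\begin{" ++ e ++ "}", "\\end{" ++ e ++ "}")) ("", ""),
         ("", ""),
         pvO (pvLook d.items "text-indent") (fun v => ("\\set[parameter=document.parindent,value=" ++ v ++ "]", "")) ("", ""),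
         pvO (pvLook d.items "color") (fun v => ("\\color[color=" ++ v ++ "]{", "}")) ("", "")].set 5
           ("\\font[" ++ PySem.Str.join "," FA ++ "]{", "}"))
      = (pvRules d).map (fun r => if r.1 = true then r.2 else (("" : String), ("" : String))) := by
    have hie : FA.isEmpty
        = (["script", "language", "style", "weight", "family", "size"].filter (fun k => d.contains k)).isEmpty := by
      simp [hFA]
    by_cases hfe : FA.isEmpty = true
    · have hfe' : (["script", "language", "style", "weight", "family", "size"].filter (fun k => d.contains k)).isEmpty = true := by
        rw [← hie]; exact hfe
      simp only [hfe, if_true]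
      simp only [pvRules, List.map_cons, List.map_nil, hfe', Bool.not_true, Bool.false_eq_true, if_false]
      rw [pv_slot_iff, pv_slot_iff, pv_slot_iff, pv_slot_iff, pv_slot4, pv_slot_iff, pv_slot_iff]
    · have hfe2 : FA.isEmpty = false := by
        cases hx : FA.isEmpty
        · rfl
        · exact absurd hx hfe
      have hfe' : (["script", "language", "style", "weight", "family", "size"].filter (fun k => d.contains k)).isEmpty = false := by
        rw [← hie]; exact hfe2
      simp only [hfe2, Bool.false_eq_true, if_false]
      rw [pv_set5]
      simp only [pvRules, List.map_cons, List.map_nil, hfe', Bool.not_false, if_true]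
      rw [pv_slot_iff, pv_slot_iff, pv_slot_iff, pv_slot_iff, pv_slot4, pv_slot_iff, pv_slot_iff, ← hFA]
  rw [hslots, pv_foldA, pv_mapfst_if, ← List.map_reverse, pv_mapsnd_if]
  have e1 : ∀ s : String, "" ++ s = s := fun s => by simp
  have e2 : ∀ s : String, s ++ "" = s := fun s => by simp
  rw [e1, e2]

-- ===== VERDICT (by name: the statement is the Claim_ definition above) =====
theorem css_to_sile_spec : Claim_equal_css_to_sile := by
  intro style hdom hpre
  unfold Spec_css_to_sile
  rw [pv_alt_eq style hpre]
  unfold css_to_sile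
  dsimp only
  simp only [pvRules, List.foldl_cons, List.foldl_nil]
  exact pv_color _ _ _ (pv_indent _ _ _ (pv_font _ _ _ (pv_align _ _ _ (pv_margin _))))
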